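-- pv_equiv track=rewrite | github.com/AngelHernandez333/Real-time-event-detection-using-CNNs-and-MLLMs | OldScripts/Old2/Functions.py | prompt_text
-- ===== SOURCE A (Python) =====
-- def prompt_text(classes):
--     initial = "There are"
--     objects = ""
--     counter = 0
--     for x, y in classes.items():
--         if y > 0 and counter < 3:
--             if counter == 2:
--                 objects += " and"
--             objects += f" {y} {x},"
--             if y > 1:
--                 objects = objects[:-1] + "s,"
--             counter += 1
--     if objects == "":
--         text = "Watch the video,"
--     else:
--         objects = objects[:-1]
--         text = f"{initial}{objects} in the video,"
--     return text
-- ===== SOURCE B (Python) =====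
-- def prompt_text(classes):
--     def fmt(item):
--         x, y = item
--         return f"{y} {x}" + ("s" if y > 1 else "")
--     picked = [item for item in classes.items() if item[1] > 0][:3]
--     if len(picked) == 0:
--         return "Watch the video,"
--     if len(picked) == 1:
--         return f"There are {fmt(picked[0])} in the video,"
--     if len(picked) == 2:
--         return f"There are {fmt(picked[0])}, {fmt(picked[1])} in the video,"
--     return f"There are {fmt(picked[0])}, {fmt(picked[1])}, and {fmt(picked[2])} in the video,"
-- ===== Notes on version B (the rewrite author's own statement) =====
-- stated objective: simpler
-- what changed: B replaces A's single stateful loop (counter, growing string, objects[:-1] re-slicing for pluralization and comma stripping) by two stages: a filter of positive-count items sliced to the first three, then a case analysis on that list's arity (0/1/2/3) returning an explicit closed-form sentence template for each case.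
import Mathlib
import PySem

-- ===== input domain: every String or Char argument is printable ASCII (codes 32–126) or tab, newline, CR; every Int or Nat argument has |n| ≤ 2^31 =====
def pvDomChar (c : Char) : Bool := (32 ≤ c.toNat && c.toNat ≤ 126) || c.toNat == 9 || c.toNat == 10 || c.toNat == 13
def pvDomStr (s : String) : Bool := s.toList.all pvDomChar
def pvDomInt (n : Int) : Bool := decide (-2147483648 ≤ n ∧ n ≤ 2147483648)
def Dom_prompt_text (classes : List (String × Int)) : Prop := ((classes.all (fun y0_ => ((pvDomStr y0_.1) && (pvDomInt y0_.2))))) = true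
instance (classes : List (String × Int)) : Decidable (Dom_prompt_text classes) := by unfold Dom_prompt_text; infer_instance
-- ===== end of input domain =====

-- B filters the positive-count items, takes the first three, and returns an explicit
-- sentence template per arity (0/1/2/3), instead of A's stateful loop with counter,
-- incremental concatenation and [:-1] re-slicing; objective: simpler.

-- ===== PORT A =====
-- A's loop state: (objects, counter); strings kept as List Char, objects[:-1] = dropLast.
def promptA_loop : List (String × Int) → List Char → Int → List Char
  | [], objects, _ => objects
  | (x, y) :: rest, objects, counter =>
    if y > 0 ∧ counter < 3 then
      let objects := if counter = 2 then objects ++ (" and").toList else objects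
      let objects := objects ++ [' '] ++ (PySem.Int.toStr y).toList ++ [' '] ++ x.toList ++ [',']
      let objects := if y > 1 then objects.dropLast ++ ['s', ','] else objects
      promptA_loop rest objects (counter + 1)
    else promptA_loop rest objects counter

def prompt_text (classes : List (String × Int)) : String :=
  let objects := promptA_loop classes [] 0
  if objects = [] then "Watch the video,"
  else String.ofList ("There are".toList ++ objects.dropLast ++ " in the video,".toList)

-- ===== PORT B =====
-- Source B's fmt(item): "{y} {x}" plus a plural 's'.
def fmtB (p : String × Int) : List Char :=
  (PySem.Int.toStr p.2).toList ++ ' ' :: p.1.toList ++ (if p.2 > 1 then ['s'] else [])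

def prompt_text_alt (classes : List (String × Int)) : String :=
  let picked := (classes.filter (fun p => p.2 > 0)).take 3
  match picked with
  | [] => "Watch the video,"
  | [a] => String.ofList ("There are ".toList ++ fmtB a ++ " in the video,".toList)
  | [a, b] => String.ofList ("There are ".toList ++ fmtB a ++ ", ".toList ++ fmtB b ++ " in the video,".toList)
  | a :: b :: c :: _ => String.ofList ("There are ".toList ++ fmtB a ++ ", ".toList ++ fmtB b ++ ", and ".toList ++ fmtB c ++ " in the video,".toList)

-- ===== PRECONDITION & SPEC =====
def Spec_prompt_text (classes : List (String × Int)) (out : String) : Prop := out = prompt_text_alt classes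
instance (classes : List (String × Int)) (out : String) : Decidable (Spec_prompt_text classes out) := by unfold Spec_prompt_text; infer_instance

-- ===== CLAIM (what is proved, stated in full; the proofs are below) =====
def Claim_equal_prompt_text : Prop := ∀ (classes : List (String × Int)), Dom_prompt_text classes → Spec_prompt_text classes (prompt_text classes)

-- ===== LEMMAS AND PROOFS =====

-- A's objects string as a function of the selected items (length ≤ 3).
def glue : List (String × Int) → List Char
  | [] => []
  | [a] => ' ' :: (fmtB a ++ [','])
  | [a, b] => ' ' :: (fmtB a ++ [',']) ++ ' ' :: (fmtB b ++ [','])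
  | a :: b :: c :: _ =>
      ' ' :: (fmtB a ++ [',']) ++ ' ' :: (fmtB b ++ [',']) ++ " and ".toList ++ fmtB c ++ [',']

theorem glue_step (sel : List (String × Int)) (x : String) (y : Int)
    (h : sel.length ≤ 2) (_hy : y > 0) :
    (if y > 1 then
      ((if sel.length = 2 then glue sel ++ (" and").toList else glue sel) ++ [' '] ++
        (PySem.Int.toStr y).toList ++ [' '] ++ x.toList ++ [',']).dropLast ++ ['s', ',']
    else
      (if sel.length = 2 then glue sel ++ (" and").toList else glue sel) ++ [' '] ++
        (PySem.Int.toStr y).toList ++ [' '] ++ x.toList ++ [',']) = glue (sel ++ [(x, y)]) := by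
  by_cases h1 : y > 1
  · rw [if_pos h1, List.dropLast_concat]
    match sel, h with
    | [], _ => simp [glue, fmtB, h1]
    | [a], _ => simp [glue, fmtB, h1]
    | [a, b], _ => simp [glue, fmtB, h1]
  · rw [if_neg h1]
    match sel, h with
    | [], _ => simp [glue, fmtB, h1]
    | [a], _ => simp [glue, fmtB, h1]
    | [a, b], _ => simp [glue, fmtB, h1]

theorem promptA_loop_glue (l : List (String × Int)) (sel : List (String × Int))
    (h : sel.length ≤ 3) :
    promptA_loop l (glue sel) (sel.length : Int) =
      glue (sel ++ ((l.filter (fun p => p.2 > 0)).take (3 - sel.length))) := by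
  induction l generalizing sel with
  | nil => simp [promptA_loop]
  | cons p rest ih =>
    obtain ⟨x, y⟩ := p
    simp only [promptA_loop]
    by_cases h3 : sel.length = 3
    · rw [if_neg (by omega)]
      have := ih sel h
      simpa [h3] using this
    · by_cases hy : y > 0
      · rw [if_pos ⟨hy, by omega⟩]
        have hif : (if ((sel.length : Nat) : Int) = 2 then glue sel ++ (" and").toList
            else glue sel) =
            (if sel.length = 2 then glue sel ++ (" and").toList else glue sel) := by
          by_cases h2 : sel.length = 2
          · rw [if_pos (by omega : ((sel.length : Nat) : Int) = 2), if_pos h2]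
          · rw [if_neg (by omega : ¬ ((sel.length : Nat) : Int) = 2), if_neg h2]
        rw [hif, glue_step sel x y (by omega) hy]
        rw [show ((sel.length : Nat) : Int) + 1 = (((sel ++ [(x, y)]).length : Nat) : Int) by simp]
        rw [ih (sel ++ [(x, y)]) (by simp; omega)]
        congr 1
        have hf : List.filter (fun p => decide (p.2 > 0)) ((x, y) :: rest) =
            (x, y) :: List.filter (fun p => decide (p.2 > 0)) rest := by simp [hy]
        rw [hf, show 3 - sel.length = (3 - (sel ++ [(x, y)]).length) + 1 by simp; omega,
          List.take_succ_cons]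
        simp
      · rw [if_neg (by tauto)]
        rw [ih sel h]
        congr 2
        simp [hy]

theorem glue_dropLast1 (a : String × Int) : (glue [a]).dropLast = ' ' :: fmtB a := by
  have h : glue [a] = (' ' :: fmtB a) ++ [','] := by simp [glue]
  rw [h, List.dropLast_concat]

theorem glue_dropLast2 (a b : String × Int) :
    (glue [a, b]).dropLast = ' ' :: fmtB a ++ ',' :: ' ' :: fmtB b := by
  have h : glue [a, b] = (' ' :: fmtB a ++ ',' :: ' ' :: fmtB b) ++ [','] := by simp [glue]
  rw [h, List.dropLast_concat]

theorem glue_dropLast3 (a b c : String × Int) (t : List (String × Int)) :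
    (glue (a :: b :: c :: t)).dropLast =
      ' ' :: fmtB a ++ ',' :: ' ' :: fmtB b ++ ',' :: " and ".toList ++ fmtB c := by
  have h : glue (a :: b :: c :: t) =
      (' ' :: fmtB a ++ ',' :: ' ' :: fmtB b ++ ',' :: " and ".toList ++ fmtB c) ++ [','] := by
    simp [glue]
  rw [h, List.dropLast_concat]

-- ===== VERDICT (by name: the statement is the Claim_ definition above) =====
theorem prompt_text_spec : Claim_equal_prompt_text := by
  intro classes _
  unfold Spec_prompt_text prompt_text prompt_text_alt
  simp only [gt_iff_lt]
  have h0 : promptA_loop classes [] 0 =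
      glue ((classes.filter (fun p => decide (0 < p.2))).take 3) := by
    have := promptA_loop_glue classes [] (by simp)
    simpa [glue] using this
  rw [h0]
  generalize hp : (classes.filter (fun p => decide (0 < p.2))).take 3 = pick
  match pick with
  | [] => simp [glue]
  | [a] =>
    rw [if_neg (by simp [glue]), glue_dropLast1]
    simp
  | [a, b] =>
    rw [if_neg (by simp [glue]), glue_dropLast2]
    simp
  | a :: b :: c :: t =>
    rw [if_neg (by simp [glue]), glue_dropLast3]
    simp
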